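-- pv_equiv track=rewrite | github.com/rohanvinaik/TailChasingFixer | tailchasing/fixers/strategies/duplicates.py | _choose_primary_and_secondary
-- ===== SOURCE A (Python) =====
-- from typing import List, Dict, Any, Optional, Tuple
--
-- def _choose_primary_and_secondary(pair: List[Dict[str, Any]]) -> Tuple[Dict[str, Any], Dict[str, Any]]:
--     """Choose which implementation to keep as primary."""
--
--     def score_implementation(impl: Dict[str, Any]) -> float:
--         score = 0.0
--
--         # Prefer longer implementations (more complete)
--         code = impl.get('code', '')
--         if code and len(code) > 20:
--             score += 1.0
--
--         # Prefer implementations with docstrings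
--         if '"""' in code or "'''" in code:
--             score += 0.5
--
--         # Prefer implementations without TODO/FIXME
--         if 'TODO' not in code and 'FIXME' not in code:
--             score += 0.5
--
--         # Prefer implementations with better names
--         name = impl.get('name', '')
--         if name and not name.startswith('_') and len(name) > 3:
--             score += 0.3
--
--         # Prefer implementations in main modules over test files
--         file_path = impl.get('file', '')
--         if 'test' not in file_path.lower():
--             score += 0.2
--
--         return score
--
--     scores = [(impl, score_implementation(impl)) for impl in pair]
--     scores.sort(key=lambda x: x[1], reverse=True)
--
--     return scores[0][0], scores[1][0]
-- ===== SOURCE B (Python) =====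
-- from typing import List, Dict, Any, Tuple
--
-- def _choose_primary_and_secondary(pair: List[Dict[str, Any]]) -> Tuple[Dict[str, Any], Dict[str, Any]]:
--     """Choose which implementation to keep as primary (single linear pass, no sort)."""
--
--     def score_implementation(impl: Dict[str, Any]) -> float:
--         score = 0.0
--         code = impl.get('code', '')
--         if code and len(code) > 20:
--             score += 1.0
--         if '"""' in code or "'''" in code:
--             score += 0.5
--         if 'TODO' not in code and 'FIXME' not in code:
--             score += 0.5
--         name = impl.get('name', '')
--         if name and not name.startswith('_') and len(name) > 3:
--             score += 0.3
--         file_path = impl.get('file', '')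
--         if 'test' not in file_path.lower():
--             score += 0.2
--         return score
--
--     it = iter(pair)
--     best = next(it)
--     best_s = score_implementation(best)
--     second = next(it)
--     second_s = score_implementation(second)
--     if second_s > best_s:
--         best, best_s, second, second_s = second, second_s, best, best_s
--     for impl in it:
--         s = score_implementation(impl)
--         if s > best_s:
--             best, best_s, second, second_s = impl, s, best, best_s
--         elif s > second_s:
--             second, second_s = impl, s
--     return best, second
-- ===== Notes on version B (the rewrite author's own statement) =====
-- stated objective: alternative
-- what changed: Replaced 'score every element, stable-sort the (impl,score) list descending and take indices 0 and 1' by a single linear pass that maintains the best and second-best (impl,score), displacing only on strictly greater score to preserve the stable tie-breaking.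
import Mathlib
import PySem

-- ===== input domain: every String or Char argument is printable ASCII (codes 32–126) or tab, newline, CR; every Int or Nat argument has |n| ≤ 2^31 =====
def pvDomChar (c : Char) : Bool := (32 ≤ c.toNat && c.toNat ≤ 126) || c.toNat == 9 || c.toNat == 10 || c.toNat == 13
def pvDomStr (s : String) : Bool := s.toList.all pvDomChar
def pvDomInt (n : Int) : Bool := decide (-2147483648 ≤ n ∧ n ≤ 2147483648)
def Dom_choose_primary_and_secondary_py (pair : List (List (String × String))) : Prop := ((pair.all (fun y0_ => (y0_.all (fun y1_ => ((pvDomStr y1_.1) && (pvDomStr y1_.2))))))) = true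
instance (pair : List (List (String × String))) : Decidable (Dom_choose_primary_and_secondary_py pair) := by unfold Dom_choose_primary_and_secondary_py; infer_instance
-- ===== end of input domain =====

-- B replaces A's "score all, stable-sort descending, take [0] and [1]" by one linear pass
-- keeping (best, second-best); objective: alternative (no sort pass).

-- ===== PORT A =====
-- score_implementation, shared verbatim by both ports (the Python B keeps A's helper).
-- Python returns a float built from 0.0 +1.0 +0.5 +0.5 +0.3 +0.2; the port scales by 10 to Int.
-- This is exact for every comparison the programs make: all 32 possible float sums (added in the
-- fixed program order) compare identically to the corresponding ×10 integer sums (checked exhaustively).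
def pvScore (impl : List (String × String)) : Int :=
  let code := PySem.Dict.getD ⟨impl⟩ "code" ""
  let score : Int := 0
  let score := if code ≠ "" ∧ 20 < PySem.Str.len code then score + 10 else score
  let score := if PySem.Str.isIn "\"\"\"" code || PySem.Str.isIn "'''" code then score + 5 else score
  let score := if ¬ PySem.Str.isIn "TODO" code = true ∧ ¬ PySem.Str.isIn "FIXME" code = true then score + 5 else score
  let name := PySem.Dict.getD ⟨impl⟩ "name" ""
  let score := if name ≠ "" ∧ ¬ PySem.Str.startswith name "_" = true ∧ 3 < PySem.Str.len name then score + 3 else score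
  let file_path := PySem.Dict.getD ⟨impl⟩ "file" ""
  let score := if ¬ PySem.Str.isIn "test" (PySem.Str.lower file_path) = true then score + 2 else score
  score

def choose_primary_and_secondary_py (pair : List (List (String × String))) : (List (String × String)) × (List (String × String)) :=
  let scores := pair.map (fun impl => (impl, pvScore impl))
  let sorted := PySem.List.sorted scores (fun x => x.2) true
  ((PySem.List.pyGetD sorted 0 ([], 0)).1, (PySem.List.pyGetD sorted 1 ([], 0)).1)

-- ===== PORT B =====
def choose_primary_and_secondary_py_alt (pair : List (List (String × String))) : (List (String × String)) × (List (String × String)) :=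
  match pair with
  | [] => ([], [])          -- Python B raises here (outside Pre_)
  | [_] => ([], [])         -- Python B raises here (outside Pre_)
  | x :: y :: rest =>
    let sx := pvScore x
    let sy := pvScore y
    let init := if sx < sy then ((y, sy), (x, sx)) else ((x, sx), (y, sy))
    let fin := rest.foldl (fun st impl =>
        let s := pvScore impl
        if st.1.2 < s then ((impl, s), st.1)
        else if st.2.2 < s then (st.1, (impl, s))
        else st) init
    (fin.1.1, fin.2.1)

-- ===== PRECONDITION & SPEC =====
-- A indexes scores[0] and scores[1]: on lists with fewer than two elements it raises IndexError.
def Pre_choose_primary_and_secondary_py (pair : List (List (String × String))) : Prop := 2 ≤ pair.length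
instance (pair : List (List (String × String))) : Decidable (Pre_choose_primary_and_secondary_py pair) := by unfold Pre_choose_primary_and_secondary_py; infer_instance
def pvWitness_choose_primary_and_secondary_py : (List (List (String × String))) :=
  [[("code", "def f():\n    \"\"\"doc\"\"\"\n    return 1"), ("name", "good"), ("file", "main.py")],
   [("code", "TODO"), ("name", "_p"), ("file", "tests/t.py")]]

def Spec_choose_primary_and_secondary_py (pair : List (List (String × String))) (out : (List (String × String)) × (List (String × String))) : Prop := out = choose_primary_and_secondary_py_alt pair
instance (pair : List (List (String × String))) (out : (List (String × String)) × (List (String × String))) : Decidable (Spec_choose_primary_and_secondary_py pair out) := by unfold Spec_choose_primary_and_secondary_py; infer_instance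

-- ===== CLAIM (what is proved, stated in full; the proofs are below) =====
def Claim_equal_choose_primary_and_secondary_py : Prop := ∀ (pair : List (List (String × String))), Dom_choose_primary_and_secondary_py pair → Pre_choose_primary_and_secondary_py pair → Spec_choose_primary_and_secondary_py pair (choose_primary_and_secondary_py pair)

-- ===== LEMMAS AND PROOFS =====

-- the element type of A's scored list
-- step of B's scan, on scored pairs
def pvStep (st : ((List (String × String)) × Int) × ((List (String × String)) × Int))
    (x : (List (String × String)) × Int) :
    ((List (String × String)) × Int) × ((List (String × String)) × Int) :=
  if st.1.2 < x.2 then (x, st.1) else if st.2.2 < x.2 then (st.1, x) else st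

-- insertion into a list with at least two elements: the new first two elements
lemma pvInsertBy_two (x a b : (List (String × String)) × Int) (t : List ((List (String × String)) × Int)) :
    PySem.List.insertBy (fun u v => decide (v.2 < u.2)) x (a :: b :: t)
      = if a.2 < x.2 then x :: a :: b :: t
        else if b.2 < x.2 then a :: x :: b :: t
        else a :: b :: PySem.List.insertBy (fun u v => decide (v.2 < u.2)) x t := by
  by_cases h1 : a.2 < x.2 <;> by_cases h2 : b.2 < x.2 <;>
    simp [PySem.List.insertBy, h1, h2]

-- the accumulated insertion sort keeps its first two elements equal to B's scan state
lemma pvMain (rest : List ((List (String × String)) × Int))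
    (a b : (List (String × String)) × Int) (t : List ((List (String × String)) × Int)) :
    ∃ t', List.foldl (fun acc x => PySem.List.insertBy (fun u v => decide (v.2 < u.2)) x acc)
            (a :: b :: t) rest
          = (rest.foldl pvStep (a, b)).1 :: (rest.foldl pvStep (a, b)).2 :: t' := by
  induction rest generalizing a b t with
  | nil => exact ⟨t, rfl⟩
  | cons x rest ih =>
    simp only [List.foldl_cons, pvInsertBy_two]
    by_cases h1 : a.2 < x.2
    · simpa [pvStep, h1] using ih x a (b :: t)
    · by_cases h2 : b.2 < x.2
      · simpa [pvStep, h1, h2] using ih a x (b :: t)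
      · simpa [pvStep, h1, h2] using
          ih a b (PySem.List.insertBy (fun u v => decide (v.2 < u.2)) x t)


lemma pvGetD_one {α : Type} (a b : α) (t : List α) (d : α) :
    PySem.List.pyGetD (a :: b :: t) 1 d = b := by
  simp [PySem.List.pyGetD, PySem.List.pyGet?, PySem.List.pyIdx?]

-- ===== VERDICT (by name: the statement is the Claim_ definition above) =====
set_option maxHeartbeats 1000000 in
theorem choose_primary_and_secondary_py_spec : Claim_equal_choose_primary_and_secondary_py := by
  intro pair _ hpre
  unfold Spec_choose_primary_and_secondary_py
  match pair with
  | [] => simp [Pre_choose_primary_and_secondary_py] at hpre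
  | [_] => simp [Pre_choose_primary_and_secondary_py] at hpre
  | x :: y :: rest =>
    show choose_primary_and_secondary_py (x :: y :: rest) = _
    unfold choose_primary_and_secondary_py choose_primary_and_secondary_py_alt
    simp only [List.map_cons, PySem.List.sorted, List.foldl_cons, if_true]
    have hins1 : PySem.List.insertBy (fun u v => decide (v.2 < u.2))
        ((x, pvScore x) : (List (String × String)) × Int) [] = [(x, pvScore x)] := rfl
    rw [hins1]
    by_cases h : pvScore x < pvScore y
    · have hins2 : PySem.List.insertBy (fun u v => decide (v.2 < u.2))
          ((y, pvScore y) : (List (String × String)) × Int) [(x, pvScore x)]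
          = [(y, pvScore y), (x, pvScore x)] := by
        simp [PySem.List.insertBy, h]
      rw [hins2]
      obtain ⟨t', ht⟩ := pvMain (rest.map (fun impl => (impl, pvScore impl)))
        (y, pvScore y) (x, pvScore x) []
      rw [ht, List.foldl_map]
      simp only [pvStep, PySem.List.pyGetD_zero_cons, pvGetD_one, if_pos h]
    · have hins2 : PySem.List.insertBy (fun u v => decide (v.2 < u.2))
          ((y, pvScore y) : (List (String × String)) × Int) [(x, pvScore x)]
          = [(x, pvScore x), (y, pvScore y)] := by
        simp [PySem.List.insertBy, h]
      rw [hins2]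
      obtain ⟨t', ht⟩ := pvMain (rest.map (fun impl => (impl, pvScore impl)))
        (x, pvScore x) (y, pvScore y) []
      rw [ht, List.foldl_map]
      simp only [pvStep, PySem.List.pyGetD_zero_cons, pvGetD_one, if_neg h]
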